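-- pv_equiv track=rewrite | github.com/omacDota/Development | MyProjects/InP-Development/Task-1_ScorePrediction/IPT_predictScore.py | calcInverseDifference
-- ===== SOURCE A (Python) =====
-- def calcInverseDifference(list_dataset):
--     ''' This Function is used to Calculate difference of all the elments of the provided list. '''
--     l_list_tempDifferenceArray = list()
--
--     for subArray in list_dataset:
--         l_int_diff = int()
--         for i in range (len(subArray)-1):
--             l_int_diff = l_int_diff + (subArray[i+1] - subArray[i])
--         l_list_tempDifferenceArray.append([abs(l_int_diff)]) # Get the Mod Value
--
--     return l_list_tempDifferenceArray
-- ===== SOURCE B (Python) =====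
-- def calcInverseDifference(list_dataset):
--     ''' Telescoping: the sum of consecutive differences of a list is last - first. '''
--     return [[abs(s[-1] - s[0])] if s else [0] for s in list_dataset]
-- ===== Notes on version B (the rewrite author's own statement) =====
-- stated objective: faster
-- what changed: Replaced the inner per-element summation loop with the closed-form telescoping identity abs(last-first) per subarray (0 for an empty one), computed in a single comprehension.
import Mathlib
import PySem

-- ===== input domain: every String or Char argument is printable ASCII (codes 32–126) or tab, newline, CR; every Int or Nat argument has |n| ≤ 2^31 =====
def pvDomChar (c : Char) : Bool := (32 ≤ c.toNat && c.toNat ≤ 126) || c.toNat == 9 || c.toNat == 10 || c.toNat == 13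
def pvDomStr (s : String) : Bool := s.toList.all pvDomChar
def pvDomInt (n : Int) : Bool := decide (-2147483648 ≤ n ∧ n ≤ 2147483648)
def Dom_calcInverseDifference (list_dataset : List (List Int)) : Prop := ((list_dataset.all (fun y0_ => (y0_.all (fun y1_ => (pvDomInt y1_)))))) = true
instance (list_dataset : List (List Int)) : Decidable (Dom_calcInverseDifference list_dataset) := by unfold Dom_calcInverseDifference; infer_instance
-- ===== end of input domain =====

-- B replaces A's inner summation loop by the closed-form telescoping value abs(last - first) per subarray (faster: O(#subarrays) instead of O(#elements)).

-- ===== PORT A =====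
def calcInverseDifference (list_dataset : List (List Int)) : List (List Int) :=
  list_dataset.foldl
    (fun l_list_tempDifferenceArray subArray =>
      let l_int_diff : Int :=
        (PySem.List.pyRange 0 ((subArray.length : Int) - 1) 1).foldl
          (fun l_int_diff i =>
            l_int_diff + (PySem.List.pyGetD subArray (i + 1) 0 - PySem.List.pyGetD subArray i 0))
          0
      l_list_tempDifferenceArray ++ [[|l_int_diff|]])
    []

-- ===== PORT B =====
def calcInverseDifference_alt (list_dataset : List (List Int)) : List (List Int) :=
  list_dataset.map (fun s =>
    if s.isEmpty then [0]
    else [|PySem.List.pyGetD s (-1) 0 - PySem.List.pyGetD s 0 0|])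

-- ===== PRECONDITION & SPEC =====
def Spec_calcInverseDifference (list_dataset : List (List Int)) (out : List (List Int)) : Prop := out = calcInverseDifference_alt list_dataset
instance (list_dataset : List (List Int)) (out : List (List Int)) : Decidable (Spec_calcInverseDifference list_dataset out) := by unfold Spec_calcInverseDifference; infer_instance

-- ===== CLAIM (what is proved, stated in full; the proofs are below) =====
def Claim_equal_calcInverseDifference : Prop := ∀ (list_dataset : List (List Int)), Dom_calcInverseDifference list_dataset → Spec_calcInverseDifference list_dataset (calcInverseDifference list_dataset)

-- ===== LEMMAS AND PROOFS =====

-- Telescoping: summing consecutive differences over all indices yields last - first.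
theorem pv_telescope (xs : List Int) (x c : Int) :
    (List.range xs.length).foldl
      (fun d i => d + ((x :: xs).getD (i + 1) 0 - (x :: xs).getD i 0)) c
    = c + ((x :: xs).getLast (by simp) - x) := by
  induction xs generalizing x c with
  | nil => simp
  | cons y ys ih =>
    rw [List.length_cons, List.range_succ_eq_map, List.foldl_cons, List.foldl_map]
    have h := ih y (c + ((x :: y :: ys).getD 1 0 - (x :: y :: ys).getD 0 0))
    simp only [List.getD_cons_succ, List.getD_cons_zero] at h ⊢
    rw [h]
    have : (y :: ys).getLast (by simp) = (x :: y :: ys).getLast (by simp) := by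
      simp [List.getLast_cons]
    rw [this]; ring

-- Per-subarray equality of A's inner loop result with B's closed form.
theorem pv_sub (s : List Int) :
    [|((PySem.List.pyRange 0 ((s.length : Int) - 1) 1).foldl
        (fun d i => d + (PySem.List.pyGetD s (i + 1) 0 - PySem.List.pyGetD s i 0)) 0 : Int)|]
    = (if s.isEmpty then [0]
       else [|PySem.List.pyGetD s (-1) 0 - PySem.List.pyGetD s 0 0|]) := by
  cases s with
  | nil => decide
  | cons x xs =>
    have hne : (x :: xs) ≠ [] := by simp
    have hlen : ((x :: xs).length : Int) - 1 = (xs.length : Int) := by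
      simp
    rw [hlen, PySem.List.pyRange_zero_natCast, List.foldl_map]
    have : (List.range xs.length).foldl
        (fun d (i : Nat) => d + (PySem.List.pyGetD (x :: xs) ((i : Int) + 1) 0
          - PySem.List.pyGetD (x :: xs) (i : Int) 0)) 0
      = (List.range xs.length).foldl
        (fun d i => d + ((x :: xs).getD (i + 1) 0 - (x :: xs).getD i 0)) 0 := by
      apply PySem.List.foldl_congr_mem
      intro d i _
      have h1 : ((i : Int) + 1) = ((i + 1 : Nat) : Int) := by push_cast; ring
      rw [h1, PySem.List.pyGetD_natCast, PySem.List.pyGetD_natCast]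
    rw [this, pv_telescope]
    rw [PySem.List.pyGetD_neg_one (x :: xs) 0 hne]
    simp [List.isEmpty, PySem.List.pyGetD_zero_cons]

-- ===== VERDICT (by name: the statement is the Claim_ definition above) =====
theorem calcInverseDifference_spec : Claim_equal_calcInverseDifference := by
  intro list_dataset _
  unfold Spec_calcInverseDifference calcInverseDifference calcInverseDifference_alt
  rw [PySem.List.foldl_append_singleton_eq_map]
  exact List.map_congr_left (fun s _ => pv_sub s)
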